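-- pv_equiv track=rewrite | github.com/AP-MI-2021/lab-3-zaharie-stefan-ubb | main.py | get_longest_all_primes
-- ===== SOURCE A (Python) =====
-- from math import sqrt
-- from itertools import islice, count
--
-- def is_prime(num: int) -> bool:
--     """Determină dacă numărul dat este prim."""
--     if num < 2:
--         return False
--
--     for div in islice(count(2), int(sqrt(num) - 1)):
--         if num % div == 0:
--             return False
--
--     return True
--
-- def get_longest_all_primes(lst: list[int]) -> list[int]:
--     """Determina cea mai lunga subsecventa dintr-o lista data cu proprietatea
--     ca toate numerele din ea sunt prime."""
--     ans = []
--     sequence = []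
--
--     for num in lst:
--         if is_prime(num):
--             sequence.append(num)
--         else:
--             if len(sequence) > len(ans):
--                 ans = sequence
--             sequence = []
--
--     # edge case, sequence is at the end of the list
--     if len(sequence) > len(ans):
--         ans = sequence
--
--     return ans
-- ===== SOURCE B (Python) =====
-- from math import sqrt
-- from itertools import islice, count, groupby
--
-- def is_prime(num: int) -> bool:
--     """Determină dacă numărul dat este prim."""
--     if num < 2:
--         return False
--
--     for div in islice(count(2), int(sqrt(num) - 1)):
--         if num % div == 0:
--             return False
--
--     return True
--
-- def get_longest_all_primes(lst: list[int]) -> list[int]: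
--     """Cea mai lunga subsecventa contigua de numere prime: grupam lista in
--     runs maximale de prime si alegem cel mai lung (primul, la egalitate)."""
--     runs = [list(g) for k, g in groupby(lst, key=is_prime) if k]
--     return max(runs, key=len, default=[])
-- ===== Notes on version B (the rewrite author's own statement) =====
-- stated objective: idiomatic
-- what changed: Replaces the manual running-best accumulator loop by grouping the list into maximal prime runs with itertools.groupby and taking the first longest run with max(runs, key=len), defaulting to an empty result when no run exists.
import Mathlib
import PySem

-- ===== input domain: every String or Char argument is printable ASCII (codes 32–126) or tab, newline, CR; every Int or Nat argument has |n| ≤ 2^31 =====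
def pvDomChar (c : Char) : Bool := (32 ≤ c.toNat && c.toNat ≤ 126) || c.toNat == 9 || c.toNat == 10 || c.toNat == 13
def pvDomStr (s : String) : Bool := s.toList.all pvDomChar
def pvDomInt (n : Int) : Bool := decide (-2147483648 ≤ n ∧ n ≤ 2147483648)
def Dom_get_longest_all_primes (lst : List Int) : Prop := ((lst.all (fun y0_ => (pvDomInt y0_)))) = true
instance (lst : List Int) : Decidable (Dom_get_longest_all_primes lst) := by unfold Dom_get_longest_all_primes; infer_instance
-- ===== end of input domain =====

-- B regroups the list into maximal runs of primes (groupby) and takes the first longest run,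
-- instead of A's running-best accumulator loop; same cost, more declarative (objective: idiomatic).

-- ===== PORT A =====
-- is_prime, shared verbatim by both Pythons.  'int(sqrt(num) - 1)' is ported as
-- Nat.sqrt num.toNat - 1: exact for 2 ≤ num ≤ 2^31, where the float sqrt is
-- accurate enough that floor(sqrt(num) - 1) = Nat.sqrt num - 1.
def primeLoop (num : Int) : List Int → Bool
  | [] => true
  | d :: ds => if PySem.Int.mod num d == 0 then false else primeLoop num ds

def is_prime (num : Int) : Bool :=
  if num < 2 then false
  else primeLoop num (PySem.List.pyRange 2 (2 + ((Nat.sqrt num.toNat : Int) - 1)) 1)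

def get_longest_all_primes (lst : List Int) : List Int :=
  let st := lst.foldl
    (fun (st : List Int × List Int) num =>
      if is_prime num then (st.1, st.2 ++ [num])
      else if st.2.length > st.1.length then (st.2, ([] : List Int))
      else (st.1, ([] : List Int)))
    (([] : List Int), ([] : List Int))
  if st.2.length > st.1.length then st.2 else st.1

-- ===== PORT B =====
-- hand port of [list(g) for k, g in groupby(lst, key=is_prime) if k]:
-- the maximal runs of consecutive primes, in order.
def primeRuns : List Int → List (List Int)
  | [] => []
  | x :: xs =>
    if is_prime x then (x :: xs.takeWhile is_prime) :: primeRuns (xs.dropWhile is_prime)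
    else primeRuns xs
termination_by lst => lst.length
decreasing_by
  · exact Nat.lt_succ_of_le (List.length_dropWhile_le _ _)
  · simp

-- max(runs, key=len, default=[]) : first run of maximal length, [] if none.
def get_longest_all_primes_alt (lst : List Int) : List Int :=
  match primeRuns lst with
  | [] => []
  | r :: rs => rs.foldl (fun b g => if b.length < g.length then g else b) r

-- ===== PRECONDITION & SPEC =====
def Spec_get_longest_all_primes (lst : List Int) (out : List Int) : Prop := out = get_longest_all_primes_alt lst
instance (lst : List Int) (out : List Int) : Decidable (Spec_get_longest_all_primes lst out) := by unfold Spec_get_longest_all_primes; infer_instance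

-- ===== CLAIM (what is proved, stated in full; the proofs are below) =====
def Claim_equal_get_longest_all_primes : Prop := ∀ (lst : List Int), Dom_get_longest_all_primes lst → Spec_get_longest_all_primes lst (get_longest_all_primes lst)

-- ===== LEMMAS AND PROOFS =====

-- "keep the longer, first wins" accumulator
def pick (b g : List Int) : List Int := if b.length < g.length then g else b

-- candidate runs produced by A's loop starting with open run seq: seq extended by the
-- leading prime run, then the later prime runs (with [] placeholders, harmless for pick).
def cand (seq : List Int) : List Int → List (List Int)
  | [] => [seq]
  | x :: xs => if is_prime x then cand (seq ++ [x]) xs else seq :: cand [] xs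

theorem pick_nil (b : List Int) : pick b [] = b := by simp [pick]

theorem foldA_eq_cand (xs : List Int) : ∀ (ans seq : List Int),
    (let st := xs.foldl
      (fun (st : List Int × List Int) num =>
        if is_prime num then (st.1, st.2 ++ [num])
        else if st.2.length > st.1.length then (st.2, ([] : List Int))
        else (st.1, ([] : List Int))) (ans, seq)
     if st.2.length > st.1.length then st.2 else st.1)
    = List.foldl pick ans (cand seq xs) := by
  induction xs with
  | nil => intro ans seq; simp [cand, pick]
  | cons x xs ih =>
    intro ans seq
    simp only [List.foldl_cons, cand]
    by_cases h : is_prime x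
    · simp only [h, if_true]; exact ih ans (seq ++ [x])
    · simp only [h, if_false, Bool.false_eq_true, List.foldl_cons]
      by_cases h2 : seq.length > ans.length
      · simp only [if_pos h2]
        rw [ih seq []]
        have : pick ans seq = seq := by simp [pick]; omega
        rw [this]
      · simp only [if_neg h2]
        rw [ih ans []]
        have : pick ans seq = ans := by simp [pick]; omega
        rw [this]

theorem fold_runs_absorb (xs : List Int) (b : List Int) :
    List.foldl pick b (xs.takeWhile is_prime :: primeRuns (xs.dropWhile is_prime))
    = List.foldl pick b (primeRuns xs) := by
  cases xs with
  | nil => simp [primeRuns, pick_nil]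
  | cons x xs =>
    by_cases h : is_prime x
    · simp [primeRuns, h]
    · simp [primeRuns, h, pick_nil]

theorem cand_eq_runs (xs : List Int) : ∀ (seq b : List Int),
    List.foldl pick b (cand seq xs)
    = List.foldl pick b ((seq ++ xs.takeWhile is_prime) :: primeRuns (xs.dropWhile is_prime)) := by
  induction xs with
  | nil => intro seq b; simp [cand, primeRuns]
  | cons x xs ih =>
    intro seq b
    by_cases h : is_prime x
    · simp only [cand, h, if_true, List.takeWhile_cons, List.dropWhile_cons]
      rw [ih (seq ++ [x]) b]
      simp
    · simp only [cand, h, if_false, Bool.false_eq_true, List.takeWhile_cons,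
        List.dropWhile_cons, List.foldl_cons, List.append_nil]
      rw [ih [] (pick b seq)]
      simp only [List.nil_append]
      rw [fold_runs_absorb]
      have : primeRuns (x :: xs) = primeRuns xs := by
        rw [primeRuns]; simp [h]
      rw [this]

theorem primeRuns_head_ne_nil (xs : List Int) :
    ∀ r rs, primeRuns xs = r :: rs → r ≠ [] := by
  induction xs with
  | nil => intro r rs h; simp [primeRuns] at h
  | cons x xs ih =>
    intro r rs h
    rw [primeRuns] at h
    by_cases hp : is_prime x
    · simp only [hp, if_true] at h
      cases h; simp
    · simp only [hp, Bool.false_eq_true, if_false] at h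
      exact ih r rs h

theorem alt_eq_fold (lst : List Int) :
    get_longest_all_primes_alt lst = List.foldl pick [] (primeRuns lst) := by
  unfold get_longest_all_primes_alt
  cases h : primeRuns lst with
  | nil => simp
  | cons r rs =>
    have hr : r ≠ [] := primeRuns_head_ne_nil lst r rs h
    simp only [List.foldl_cons]
    have : pick [] r = r := by
      simp only [pick, List.length_nil, if_pos (List.length_pos_iff.mpr hr)]
    rw [this]
    rfl

-- ===== VERDICT (by name: the statement is the Claim_ definition above) =====
theorem get_longest_all_primes_spec : Claim_equal_get_longest_all_primes := by
  intro lst _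
  unfold Spec_get_longest_all_primes get_longest_all_primes
  rw [foldA_eq_cand lst [] [], alt_eq_fold, cand_eq_runs]
  simp only [List.nil_append]
  exact fold_runs_absorb lst []
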